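-- pv_equiv track=rewrite | github.com/Chuhao-Li/from_rna_to_protein | 02_OLC_assembly.py | merge_contig
-- ===== SOURCE A (Python) =====
-- def merge_contig(a, b, min_overlap=25):
--     min_L = min(len(a), len(b))
--     # 处理相互包含的
--     if a in b:
--         return b
--     if b in a:
--         return a
--     # 处理头尾相接的
--     # a head overlap with b tail
--     for i in range(25, min_L+1):
--         if a[:i] == b[-i:]:
--             c = b + a[i:]
--             return c
--     # a tail overlap with b head
--     for i in range(25, min_L+1):
--         if b[:i] == a[-i:]:
--             c = a + b[i:]
--             return c
--     return None
-- ===== SOURCE B (Python) =====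
-- # B: instead of re-comparing full slices for every overlap length i (O(n^2)),
-- # anchor on x[:25] and let str.rfind (C-level scan) jump between candidate
-- # positions from the right; the largest matching position = the smallest
-- # overlap length, which is what A's ascending loop returns.
-- # NOTE: A hardcodes 25 and never uses its min_overlap parameter; B preserves that.
--
-- def _overlap_merge(x, y, min_L):
--     # smallest i in [25, min_L] with x[:i] == y[-i:]; return y + x[i:] or None
--     K = 25
--     if min_L < K:
--         return None
--     anchor = x[:K]
--     lo = len(y) - min_L
--     j = y.rfind(anchor, lo)
--     while j != -1:
--         i = len(y) - j
--         if y[j:] == x[:i]: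
--             return y + x[i:]
--         j = y.rfind(anchor, lo, j + K - 1)
--     return None
--
-- def merge_contig(a, b, min_overlap=25):
--     if a in b:
--         return b
--     if b in a:
--         return a
--     min_L = min(len(a), len(b))
--     m = _overlap_merge(a, b, min_L)
--     if m is not None:
--         return m
--     return _overlap_merge(b, a, min_L)
-- ===== Notes on version B (the rewrite author's own statement) =====
-- stated objective: faster
-- what changed: A rescans a fresh pair of length-i slices for every candidate overlap length i (O(n^2)); B anchors on the 25-char prefix and lets str.rfind jump directly between its occurrences from the right, testing the full overlap only there (largest matching position = smallest overlap length, so the same value is returned).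
import Mathlib
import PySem

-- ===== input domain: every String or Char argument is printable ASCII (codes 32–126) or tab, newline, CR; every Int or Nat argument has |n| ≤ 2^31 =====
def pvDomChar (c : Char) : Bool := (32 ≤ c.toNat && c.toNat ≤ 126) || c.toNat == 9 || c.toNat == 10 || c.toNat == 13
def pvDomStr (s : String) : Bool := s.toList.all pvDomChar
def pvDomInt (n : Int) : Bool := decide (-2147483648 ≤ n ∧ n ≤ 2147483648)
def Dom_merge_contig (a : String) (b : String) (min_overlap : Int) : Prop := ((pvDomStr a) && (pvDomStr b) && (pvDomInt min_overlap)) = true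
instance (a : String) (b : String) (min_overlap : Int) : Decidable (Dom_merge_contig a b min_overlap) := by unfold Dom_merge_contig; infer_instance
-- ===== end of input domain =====

-- B replaces A's quadratic slice-by-slice overlap scan with an anchor + rfind scan from the
-- right (largest matching position = smallest overlap length); same return value everywhere.
-- Note: A never uses its min_overlap parameter (it hardcodes 25); B preserves that behaviour.

-- ===== PORT A =====
-- A's overlap loop: first i in range(25, min_L+1) with x[:i] == y[-i:]; returns y + x[i:]
def mergeLoopA (x y : List Char) (minL : Int) : Option (List Char) :=
  match (PySem.List.pyRange 25 (minL + 1) 1).find?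
      (fun i => PySem.List.slice x none (some i) == PySem.List.slice y (some (-i)) none) with
  | some i => some (y ++ PySem.List.slice x (some i) none)
  | none => none

def merge_contig (a : String) (b : String) (min_overlap : Int) : Option String :=
  let aL := a.toList
  let bL := b.toList
  let minL : Int := ((min aL.length bL.length : Nat) : Int)
  if PySem.Chars.isIn aL bL then some b
  else if PySem.Chars.isIn bL aL then some a
  else
    match mergeLoopA aL bL minL with
    | some c => some (String.ofList c)
    | none =>
      match mergeLoopA bL aL minL with
      | some c => some (String.ofList c)
      | none => none

-- ===== PORT B =====
-- B's inner while loop: j runs over the positions where y.rfind finds the 25-char anchor,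
-- from the right; the dependent guard only makes the recursion total (rfind's result is
-- always below the end bound here; Python exits the loop on j' = -1, which the guard covers).
def scanLoopB (x y anchor : List Char) (lo : Int) (j : Int) : Option (List Char) :=
  if j < 0 then none   -- Python: while j != -1 (rfind only ever yields j ≥ -1)
  else
    let i : Int := (y.length : Int) - j
    if PySem.List.slice y (some j) none == PySem.List.slice x none (some i) then
      some (y ++ PySem.List.slice x (some i) none)
    else
      let j' := PySem.Chars.rfindFrom y anchor lo (some (j + 25 - 1))
      if h : 0 ≤ j' ∧ j' < j then scanLoopB x y anchor lo j' else none
termination_by j.toNat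
decreasing_by omega

-- _overlap_merge(x, y, min_L): smallest i in [25, min_L] with x[:i] == y[-i:], via rfind on x[:25]
def scanB (x y : List Char) (minL : Int) : Option (List Char) :=
  if minL < 25 then none
  else
    let anchor := PySem.List.slice x none (some 25)
    let lo : Int := (y.length : Int) - minL
    scanLoopB x y anchor lo (PySem.Chars.rfindFrom y anchor lo none)

def merge_contig_alt (a : String) (b : String) (min_overlap : Int) : Option String :=
  let aL := a.toList
  let bL := b.toList
  if PySem.Chars.isIn aL bL then some b
  else if PySem.Chars.isIn bL aL then some a
  else
    let minL : Int := ((min aL.length bL.length : Nat) : Int)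
    match scanB aL bL minL with
    | some c => some (String.ofList c)
    | none => (scanB bL aL minL).map String.ofList

-- ===== PRECONDITION & SPEC =====
def Spec_merge_contig (a : String) (b : String) (min_overlap : Int) (out : Option String) : Prop := out = merge_contig_alt a b min_overlap
instance (a : String) (b : String) (min_overlap : Int) (out : Option String) : Decidable (Spec_merge_contig a b min_overlap out) := by unfold Spec_merge_contig; infer_instance

-- ===== CLAIM (what is proved, stated in full; the proofs are below) =====
def Claim_equal_merge_contig : Prop := ∀ (a : String) (b : String) (min_overlap : Int), Dom_merge_contig a b min_overlap → Spec_merge_contig a b min_overlap (merge_contig a b min_overlap)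

-- ===== LEMMAS AND PROOFS =====

-- a "full overlap" of x over the tail of y at position p, of length y.length - p ∈ [25, m]
def FullAt (x y : List Char) (m p : Nat) : Prop :=
  y.length - m ≤ p ∧ p + 25 ≤ y.length ∧ x.take (y.length - p) = y.drop p

theorem find?_pyRange_eq_some {p : Int → Bool} {a b i : Int} (ha : a ≤ i) (hb : i < b)
    (hp : p i = true) (hmin : ∀ k, a ≤ k → k < i → p k = false) :
    (PySem.List.pyRange a b 1).find? p = some i := by
  rw [PySem.List.pyRange_one_append a i b ha hb.le, List.find?_append]
  have h1 : (PySem.List.pyRange a i 1).find? p = none := by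
    rw [List.find?_eq_none]
    intro k hk
    have hm := (PySem.List.mem_pyRange_one).mp hk
    simp [hmin k hm.1 hm.2]
  rw [h1, PySem.List.pyRange_one_cons hb]
  simp [List.find?, hp]

theorem find?_pyRange_eq_none {p : Int → Bool} {a b : Int}
    (h : ∀ k, a ≤ k → k < b → p k = false) :
    (PySem.List.pyRange a b 1).find? p = none := by
  rw [List.find?_eq_none]
  intro k hk
  have hm := (PySem.List.mem_pyRange_one).mp hk
  simp [h k hm.1 hm.2]

theorem predA_iff (x y : List Char) (i : Int) (h0 : 0 < i) :
    ((PySem.List.slice x none (some i) == PySem.List.slice y (some (-i)) none) = true)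
      ↔ x.take i.toNat = y.drop (y.length - i.toNat) := by
  rw [PySem.List.slice_to x h0.le]
  have hi : -i = -((i.toNat : Nat) : Int) := by omega
  rw [hi, PySem.List.slice_from_neg_natCast y i.toNat (by omega)]
  exact beq_iff_eq

theorem loopA_some (x y : List Char) (m : Nat) (i₀ : Nat)
    (h25 : 25 ≤ i₀) (him : i₀ ≤ m) (hfull : x.take i₀ = y.drop (y.length - i₀))
    (hmin : ∀ k : Nat, 25 ≤ k → k < i₀ → x.take k ≠ y.drop (y.length - k)) :
    mergeLoopA x y (m : Int) = some (y ++ x.drop i₀) := by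
  unfold mergeLoopA
  have hfind : (PySem.List.pyRange 25 ((m : Int) + 1) 1).find?
      (fun i => PySem.List.slice x none (some i) == PySem.List.slice y (some (-i)) none)
      = some ((i₀ : Nat) : Int) := by
    apply find?_pyRange_eq_some
    · omega
    · omega
    · rw [predA_iff x y _ (by omega)]
      simpa using hfull
    · intro k hk1 hk2
      rw [Bool.eq_false_iff, Ne, predA_iff x y k (by omega)]
      exact hmin k.toNat (by omega) (by omega)
  rw [hfind]
  simp [PySem.List.slice_from_natCast]

theorem loopA_none (x y : List Char) (m : Nat)
    (h : ∀ k : Nat, 25 ≤ k → k ≤ m → x.take k ≠ y.drop (y.length - k)) :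
    mergeLoopA x y (m : Int) = none := by
  unfold mergeLoopA
  rw [find?_pyRange_eq_none]
  intro k hk1 hk2
  rw [Bool.eq_false_iff, Ne, predA_iff x y k (by omega)]
  exact h k.toNat (by omega) (by omega)

theorem rfind_go_cases (s sub : List Char) (j : Nat) :
    (PySem.Chars.rfind.go s sub j = -1 ∧ ∀ p : Nat, p ≤ j → ¬ sub <+: s.drop p) ∨
    (∃ q : Nat, PySem.Chars.rfind.go s sub j = (q : Int) ∧ q ≤ j ∧ sub <+: s.drop q ∧
      ∀ p : Nat, p ≤ j → q < p → ¬ sub <+: s.drop p) := by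
  have go_zero : ∀ s sub : List Char, PySem.Chars.rfind.go s sub 0
      = if sub.isPrefixOf s then 0 else -1 := by
    intro s sub; simp [PySem.Chars.rfind.go]
  have go_succ : ∀ (s sub : List Char) (j : Nat), PySem.Chars.rfind.go s sub (j+1)
      = if sub.isPrefixOf (s.drop (j+1)) then ((j : Int) + 1) else PySem.Chars.rfind.go s sub j := by
    intro s sub j; simp [PySem.Chars.rfind.go]
  induction j with
  | zero =>
    by_cases h : sub.isPrefixOf s
    · right
      refine ⟨0, ?_, le_refl 0, ?_, ?_⟩
      · rw [go_zero, if_pos h]; rfl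
      · simpa using List.isPrefixOf_iff_prefix.mp h
      · intro p hp hq; omega
    · left
      refine ⟨by rw [go_zero, if_neg h], ?_⟩
      intro p hp
      have hp0 : p = 0 := Nat.le_zero.mp hp
      subst hp0
      simpa [List.isPrefixOf_iff_prefix] using h
  | succ j ih =>
    by_cases h : sub.isPrefixOf (s.drop (j+1))
    · right
      refine ⟨j + 1, ?_, le_refl _, List.isPrefixOf_iff_prefix.mp h, ?_⟩
      · rw [go_succ, if_pos h]; push_cast; ring
      · intro p hp hq; omega
    · have heq : PySem.Chars.rfind.go s sub (j+1) = PySem.Chars.rfind.go s sub j := by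
        rw [go_succ, if_neg h]
      have hnot : ¬ sub <+: s.drop (j+1) := fun hc => h (List.isPrefixOf_iff_prefix.mpr hc)
      rcases ih with ⟨h1, h2⟩ | ⟨q, hq, hqj, hpre, hmax⟩
      · left
        refine ⟨heq.trans h1, ?_⟩
        intro p hp
        rcases Nat.lt_or_ge p (j+1) with hlt | hge
        · exact h2 p (by omega)
        · have hpj : p = j + 1 := by omega
          subst hpj; exact hnot
      · right
        refine ⟨q, heq.trans hq, by omega, hpre, ?_⟩
        intro p hp hqp
        rcases Nat.lt_or_ge p (j+1) with hlt | hge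
        · exact hmax p (by omega) hqp
        · have hpj : p = j + 1 := by omega
          subst hpj; exact hnot

theorem prefix_drop_slice (y sub : List Char) (lo e p : Nat) (hsub : sub ≠ []) :
    (sub <+: ((y.take e).drop lo).drop p) ↔
      (sub <+: y.drop (lo + p) ∧ lo + p + sub.length ≤ e) := by
  have hlen : 0 < sub.length := by
    cases sub with
    | nil => exact absurd rfl hsub
    | cons a t => simp
  rw [List.drop_drop, List.drop_take, List.prefix_take_iff]
  constructor
  · rintro ⟨h1, h2⟩
    refine ⟨by simpa [Nat.add_comm] using h1, by omega⟩
  · rintro ⟨h1, h2⟩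
    refine ⟨by simpa [Nat.add_comm] using h1, by omega⟩

theorem rfindFrom_cases (y sub : List Char) (lo e : Nat) (hloe : lo ≤ e) (hey : e ≤ y.length)
    (hsub : sub ≠ []) :
    (PySem.Chars.rfindFrom y sub (lo : Int) (some (e : Int)) = -1 ∧
       ∀ p : Nat, lo ≤ p → p + sub.length ≤ e → ¬ sub <+: y.drop p) ∨
    (∃ q : Nat, PySem.Chars.rfindFrom y sub (lo : Int) (some (e : Int)) = (q : Int) ∧ lo ≤ q ∧
       q + sub.length ≤ e ∧ sub <+: y.drop q ∧
       ∀ p : Nat, lo ≤ p → p + sub.length ≤ e → q < p → ¬ sub <+: y.drop p) := by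
  have hlen : 0 < sub.length := by
    cases sub with
    | nil => exact absurd rfl hsub
    | cons a t => simp
  have hs' : ((y.take e).drop lo).length = e - lo := by simp; omega
  have hru : PySem.Chars.rfindFrom y sub (lo : Int) (some (e : Int)) =
      (if PySem.Chars.rfind ((y.take e).drop lo) sub = -1 then -1
       else (lo : Int) + PySem.Chars.rfind ((y.take e).drop lo) sub) := by
    have c1 : ¬ ((y.length : Int) < (e : Int)) := by exact_mod_cast not_lt.mpr hey
    have c2 : ¬ ((e : Int) < 0) := by omega
    have c3 : ¬ ((lo : Int) < 0) := by omega
    have c4 : ¬ ((e : Int) < (lo : Int)) := by exact_mod_cast not_lt.mpr hloe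
    simp [PySem.Chars.rfindFrom, c1, c2, c3, c4]
  have hgo : PySem.Chars.rfind ((y.take e).drop lo) sub
      = PySem.Chars.rfind.go ((y.take e).drop lo) sub (((y.take e).drop lo).length) := rfl
  rcases rfind_go_cases ((y.take e).drop lo) sub (((y.take e).drop lo).length) with
    ⟨hneg, hall⟩ | ⟨q', hq', hq'le, hpre, hmax⟩
  · left
    constructor
    · rw [hru, if_pos (hgo.trans hneg)]
    · intro p hp1 hp2 hcon
      refine hall (p - lo) (by omega) ?_
      exact (prefix_drop_slice y sub lo e (p - lo) hsub).mpr
        ⟨by rwa [show lo + (p - lo) = p from by omega], by omega⟩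
  · right
    have hpre' := (prefix_drop_slice y sub lo e q' hsub).mp hpre
    have hbound : lo + q' + sub.length ≤ e := hpre'.2
    refine ⟨lo + q', ?_, Nat.le_add_right _ _, by omega, hpre'.1, ?_⟩
    · rw [hru, if_neg (by rw [hgo, hq']; omega), hgo, hq']
      push_cast; ring
    · intro p hp1 hp2 hplt hcon
      refine hmax (p - lo) (by omega) (by omega) ?_
      exact (prefix_drop_slice y sub lo e (p - lo) hsub).mpr
        ⟨by rwa [show lo + (p - lo) = p from by omega], by omega⟩

theorem rfindFrom_none_eq (y sub : List Char) (lo : Int) :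
    PySem.Chars.rfindFrom y sub lo none = PySem.Chars.rfindFrom y sub lo (some (y.length : Int)) := by
  have c1 : ¬ ((y.length : Int) < 0) := by omega
  simp [PySem.Chars.rfindFrom, c1]

theorem anchor_prefix_of_full (x y : List Char) (m p : Nat) (h : FullAt x y m p) :
    x.take 25 <+: y.drop p := by
  obtain ⟨h1, h2, h3⟩ := h
  have hh : (x.take (y.length - p)).take 25 = x.take 25 := by
    rw [List.take_take, Nat.min_eq_left (by omega)]
  rw [← hh, h3]
  exact List.take_prefix _ _

theorem scanLoopB_eq (x y : List Char) (m : Nat) (hmx : m ≤ x.length) (hmy : m ≤ y.length)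
    (h25 : 25 ≤ m) (j : Int)
    (hJ : j = -1 ∨ (((y.length : Int) - m) ≤ j ∧ 0 ≤ j ∧ j + 25 ≤ (y.length : Int)))
    (hInv : ∀ p : Nat, FullAt x y m p → (p : Int) ≤ j) :
    scanLoopB x y (x.take 25) ((y.length : Int) - (m : Int)) j = mergeLoopA x y (m : Int) := by
  rcases hJ with rfl | ⟨hlo, h0, hup⟩
  · rw [scanLoopB.eq_def, if_pos (by omega : (-1 : Int) < 0)]
    refine (loopA_none x y m ?_).symm
    intro k hk1 hk2 hfull
    have hp : FullAt x y m (y.length - k) :=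
      ⟨by omega, by omega, by rw [show y.length - (y.length - k) = k from by omega]; exact hfull⟩
    have := hInv _ hp
    omega
  · rw [scanLoopB.eq_def, if_neg (by omega : ¬ (j < 0))]
    set jn := j.toNat with hjn
    have hj_eq : j = (jn : Int) := by omega
    have hsl1 : PySem.List.slice y (some j) none = y.drop jn := by
      rw [hj_eq, PySem.List.slice_from_natCast]
    have hi0 : (0 : Int) ≤ (y.length : Int) - j := by omega
    have hsl2 : PySem.List.slice x none (some ((y.length : Int) - j)) = x.take (y.length - jn) := by
      rw [PySem.List.slice_to x hi0]; congr 1; omega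
    have hsl3 : PySem.List.slice x (some ((y.length : Int) - j)) none = x.drop (y.length - jn) := by
      rw [PySem.List.slice_from x hi0]; congr 1; omega
    simp only []
    by_cases ht : y.drop jn = x.take (y.length - jn)
    · rw [if_pos (by rw [hsl1, hsl2]; exact beq_iff_eq.mpr ht), hsl3]
      have hres := loopA_some x y m (y.length - jn)
        (by omega) (by omega)
        (by rw [show y.length - (y.length - jn) = jn from by omega]; exact ht.symm)
        (by
          intro k hk1 hk2 hfull
          have hpfa : FullAt x y m (y.length - k) :=
            ⟨by omega, by omega,
             by rw [show y.length - (y.length - k) = k from by omega]; exact hfull⟩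
          have := hInv _ hpfa
          omega)
      rw [hres]
    · rw [if_neg (by rw [hsl1, hsl2, beq_iff_eq]; exact ht)]
      have hanchlen : (x.take 25).length = 25 := by
        rw [List.length_take]; omega
      have hanch : (x.take 25) ≠ [] := by
        intro hnil; rw [hnil] at hanchlen; simp at hanchlen
      have hearg : j + 25 - 1 = ((jn + 24 : Nat) : Int) := by omega
      have hloe : ((y.length : Int) - (m : Int)) = (((y.length - m : Nat)) : Int) := by omega
      rw [hearg, hloe]
      rcases rfindFrom_cases y (x.take 25) (y.length - m) (jn + 24) (by omega) (by omega) hanch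
        with ⟨hr1, hall⟩ | ⟨q, hq, hq1, hq2, hq3, hmax⟩
      · rw [hr1, dif_neg (by omega)]
        refine (loopA_none x y m ?_).symm
        intro k hk1 hk2 hfull
        have hpfa : FullAt x y m (y.length - k) :=
          ⟨by omega, by omega,
           by rw [show y.length - (y.length - k) = k from by omega]; exact hfull⟩
        have hple := hInv _ hpfa
        have hpne : y.length - k ≠ jn := by
          intro hpp
          exact ht (by rw [← hpp]; exact hpfa.2.2.symm)
        refine hall (y.length - k) (by omega) (by rw [hanchlen]; omega) ?_
        exact anchor_prefix_of_full x y m _ hpfa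
      · rw [hanchlen] at hq2
        rw [hq, dif_pos ⟨by omega, by omega⟩]
        have hrec := scanLoopB_eq x y m hmx hmy h25 (q : Int)
          (Or.inr ⟨by omega, by omega, by omega⟩)
          (by
            intro p hp
            have hple := hInv p hp
            have hpne : p ≠ jn := by
              intro hpp
              exact ht (by rw [← hpp]; exact hp.2.2.symm)
            by_contra hgt
            refine hmax p (by exact hp.1) (by rw [hanchlen]; omega) (by omega) ?_
            exact anchor_prefix_of_full x y m p hp)
        rw [hloe] at hrec
        exact hrec
termination_by j.toNat
decreasing_by omega

theorem scanB_eq (x y : List Char) (m : Nat) (hmx : m ≤ x.length) (hmy : m ≤ y.length) :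
    scanB x y (m : Int) = mergeLoopA x y (m : Int) := by
  by_cases h : m < 25
  · unfold scanB
    rw [if_pos (by omega : ((m : Nat) : Int) < 25)]
    refine (loopA_none x y m ?_).symm
    intro k hk1 hk2
    exact absurd (hk1.trans hk2) (by omega)
  · unfold scanB
    rw [if_neg (by omega : ¬ ((m : Nat) : Int) < 25)]
    have hanchor : PySem.List.slice x none (some 25) = x.take 25 := by
      rw [PySem.List.slice_to x (by omega : (0 : Int) ≤ 25)]
      rfl
    have hanchlen : (x.take 25).length = 25 := by
      rw [List.length_take]; omega
    have hanch : (x.take 25) ≠ [] := by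
      intro hnil; rw [hnil] at hanchlen; simp at hanchlen
    simp only [hanchor]
    rw [rfindFrom_none_eq]
    have hloe : ((y.length : Int) - (m : Int)) = (((y.length - m : Nat)) : Int) := by omega
    rw [hloe]
    rcases rfindFrom_cases y (x.take 25) (y.length - m) y.length (by omega) (le_refl _) hanch
      with ⟨hr, hall⟩ | ⟨q, hq, hq1, hq2, hq3, hmax⟩
    · rw [hr]
      have hrec := scanLoopB_eq x y m hmx hmy (by omega) (-1) (Or.inl rfl)
        (by
          intro p hp
          exfalso
          exact hall p hp.1 (by rw [hanchlen]; exact hp.2.1) (anchor_prefix_of_full x y m p hp))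
      rw [hloe] at hrec
      exact hrec
    · rw [hanchlen] at hq2
      rw [hq]
      have hrec := scanLoopB_eq x y m hmx hmy (by omega) (q : Int)
        (Or.inr ⟨by omega, by omega, by omega⟩)
        (by
          intro p hp
          by_contra hgt
          refine hmax p hp.1 (by rw [hanchlen]; exact hp.2.1) (by omega) ?_
          exact anchor_prefix_of_full x y m p hp)
      rw [hloe] at hrec
      exact hrec

-- ===== VERDICT (by name: the statement is the Claim_ definition above) =====
theorem merge_contig_spec : Claim_equal_merge_contig := by
  intro a b min_overlap _
  unfold Spec_merge_contig merge_contig merge_contig_alt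
  have h1 := scanB_eq a.toList b.toList (min a.toList.length b.toList.length)
    (Nat.min_le_left _ _) (Nat.min_le_right _ _)
  have h2 := scanB_eq b.toList a.toList (min a.toList.length b.toList.length)
    (Nat.min_le_right _ _) (Nat.min_le_left _ _)
  simp only [h1, h2]
  split_ifs <;> try rfl
  cases mergeLoopA a.toList b.toList ((min a.toList.length b.toList.length : Nat) : Int) <;>
    cases mergeLoopA b.toList a.toList ((min a.toList.length b.toList.length : Nat) : Int) <;> rfl
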